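-- pv_equiv track=rewrite | github.com/lpasqualin/siftwise | siftwise/strategy/planner.py | detect_collisions_in_mapping
-- ===== SOURCE A (Python) =====
-- from typing import List, Dict, Any, Optional, Iterable, Tuple
--
-- def detect_collisions_in_mapping(mapping_rows: List[Dict[str, Any]]) -> Dict[str, int]:
--     """
--     Pre-compute collisions within the mapping itself (deterministic).
--
--     Returns dict: {original_target_path: collision_count}
--
--     This makes collision detection deterministic - doesn't depend on
--     what's already on disk.
--     """
--     target_counts: Dict[str, int] = {}
--
--     for row in mapping_rows:
--         target = row.get("TargetPath", "").strip()
--         if not target: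
--             continue
--
--         # Normalize to str for counting
--         target_counts[target] = target_counts.get(target, 0) + 1
--
--     # Return only paths that have collisions (count > 1)
--     collisions = {
--         path: count - 1  # -1 because first occurrence isn't a collision
--         for path, count in target_counts.items()
--         if count > 1
--     }
--
--     return collisions
-- ===== SOURCE B (Python) =====
-- def detect_collisions_in_mapping(mapping_rows):
--     """Recursive partition: take the first stripped target, strip its duplicates
--     out of the tail, read its multiplicity off the length shrinkage, recurse on
--     the shrunken list. No counter dict and no per-key counting scans."""
--     targets = [t for t in (row.get("TargetPath", "").strip() for row in mapping_rows) if t]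
--
--     def collide(ts):
--         if not ts:
--             return {}
--         t, rest = ts[0], ts[1:]
--         others = [x for x in rest if x != t]
--         n = 1 + len(rest) - len(others)   # occurrences of t in ts
--         tail = collide(others)
--         return {t: n - 1, **tail} if n > 1 else tail
--
--     return collide(targets)
-- ===== Notes on version B (the rewrite author's own statement) =====
-- stated objective: alternative
-- what changed: Replaces the hash-tally-then-filter pass by a recursive partition: repeatedly remove all duplicates of the first remaining target, derive its multiplicity from the length shrinkage, and recurse on the shrunken list.
import Mathlib
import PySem

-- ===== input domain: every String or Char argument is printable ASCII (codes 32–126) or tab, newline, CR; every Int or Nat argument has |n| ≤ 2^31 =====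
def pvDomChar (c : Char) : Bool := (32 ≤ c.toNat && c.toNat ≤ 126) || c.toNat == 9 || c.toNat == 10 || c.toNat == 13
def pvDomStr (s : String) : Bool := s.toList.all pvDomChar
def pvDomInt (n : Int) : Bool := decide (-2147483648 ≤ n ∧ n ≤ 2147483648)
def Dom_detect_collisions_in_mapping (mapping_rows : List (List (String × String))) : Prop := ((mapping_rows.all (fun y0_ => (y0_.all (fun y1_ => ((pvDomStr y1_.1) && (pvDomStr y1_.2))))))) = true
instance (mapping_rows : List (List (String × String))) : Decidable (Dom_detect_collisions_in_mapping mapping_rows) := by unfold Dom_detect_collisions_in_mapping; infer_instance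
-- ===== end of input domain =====

-- B replaces A's counting-dict pass + filtering comprehension by a recursive partition:
-- remove all duplicates of the first remaining target, read its multiplicity off the
-- length shrinkage, recurse on the shrunken list (alternative algorithm, no counter dict).


-- ===== PORT A =====
def detect_collisions_in_mapping (mapping_rows : List (List (String × String))) : List (String × Int) :=
  -- target_counts = {}; for row in mapping_rows: target = row.get("TargetPath","").strip(); if not target: continue; target_counts[target] = target_counts.get(target,0)+1
  let target_counts : PySem.Dict String Int :=
    mapping_rows.foldl (fun d row =>
      let target := PySem.Str.strip ((PySem.Dict.mk row).getD "TargetPath" "")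
      if target = "" then d
      else d.insert target (d.getD target 0 + 1)) PySem.Dict.empty
  -- collisions = {path: count - 1 for path, count in target_counts.items() if count > 1}
  let collisions : PySem.Dict String Int :=
    target_counts.items.foldl (fun c p => if 1 < p.2 then c.insert p.1 (p.2 - 1) else c)
      PySem.Dict.empty
  collisions.items

-- ===== PORT B =====
-- def collide(ts): if not ts: return {}; t, rest = ts[0], ts[1:]; others = [x for x in rest if x != t];
--                  n = 1 + len(rest) - len(others); tail = collide(others); return {t: n-1, **tail} if n > 1 else tail
def pvCollide (ts : List String) : List (String × Int) :=
  match ts with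
  | [] => []
  | t :: rest =>
    let others := rest.filter (fun x => !(x == t))
    let n : Int := 1 + (rest.length : Int) - (others.length : Int)
    let tail := pvCollide others
    if 1 < n then (t, n - 1) :: tail else tail
termination_by ts.length
decreasing_by
  simp only [List.length_cons, List.length_unattach]
  exact Nat.lt_succ_of_le ((List.length_filter_le _ _).trans (le_of_eq List.length_attach))

def detect_collisions_in_mapping_alt (mapping_rows : List (List (String × String))) : List (String × Int) :=
  -- targets = [t for t in (row.get("TargetPath","").strip() for row in mapping_rows) if t]
  let targets : List String :=
    (mapping_rows.map (fun row => PySem.Str.strip ((PySem.Dict.mk row).getD "TargetPath" ""))).filter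
      (fun t => !(t == ""))
  pvCollide targets

-- ===== PRECONDITION & SPEC =====
-- A raises on no input, so Pre_ holds of EVERY input and excludes nothing: it only records,
-- per mapping row, that each key either is one of the usual mapping columns (TargetPath among
-- them) or is not — a tautology kept as documentation of the shape the function reads.
def Pre_detect_collisions_in_mapping (mapping_rows : List (List (String × String))) : Prop :=
  ∀ row ∈ mapping_rows, ∀ p ∈ row,
    p.1 ∈ (["TargetPath", "SourcePath", "Size", "Hash", "Mode", "Owner", "Notes"] : List String) ∨
    p.1 ∉ (["TargetPath", "SourcePath", "Size", "Hash", "Mode", "Owner", "Notes"] : List String)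
instance (mapping_rows : List (List (String × String))) : Decidable (Pre_detect_collisions_in_mapping mapping_rows) := by unfold Pre_detect_collisions_in_mapping; infer_instance
def pvWitness_detect_collisions_in_mapping : (List (List (String × String))) :=
  [[("TargetPath", "a"), ("Size", "1")], [("TargetPath", "a")]]
def Spec_detect_collisions_in_mapping (mapping_rows : List (List (String × String))) (out : List (String × Int)) : Prop := out = detect_collisions_in_mapping_alt mapping_rows
instance (mapping_rows : List (List (String × String))) (out : List (String × Int)) : Decidable (Spec_detect_collisions_in_mapping mapping_rows out) := by unfold Spec_detect_collisions_in_mapping; infer_instance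

-- ===== CLAIM (what is proved, stated in full; the proofs are below) =====
def Claim_equal_detect_collisions_in_mapping : Prop := ∀ (mapping_rows : List (List (String × String))), Dom_detect_collisions_in_mapping mapping_rows → Pre_detect_collisions_in_mapping mapping_rows → Spec_detect_collisions_in_mapping mapping_rows (detect_collisions_in_mapping mapping_rows)

-- ===== LEMMAS AND PROOFS =====

-- fold with an 'if c then g else skip' body = fold of g over the filtered list
theorem pv_foldl_if_filter {α β : Type} (p : α → Prop) [DecidablePred p] (g : β → α → β)
    (l : List α) (init : β) :
    l.foldl (fun acc x => if p x then g acc x else acc) init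
      = (l.filter (fun x => decide (p x))).foldl g init := by
  induction l generalizing init with
  | nil => rfl
  | cons a l ih =>
    by_cases h : p a <;> simp [h, ih]

-- A's skip-continue counting loop = counting loop over the filtered stripped targets
theorem pv_skip_loop (f : List (String × String) → String)
    (l : List (List (String × String))) (d : PySem.Dict String Int) :
    l.foldl (fun d row =>
        let t := f row
        if t = "" then d else d.insert t (d.getD t 0 + 1)) d
      = ((l.map f).filter (fun t => !(t == ""))).foldl
          (fun d t => d.insert t (d.getD t 0 + 1)) d := by
  induction l generalizing d with
  | nil => rfl
  | cons a l ih =>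
    by_cases h : f a = "" <;> simp [h, ih]

-- folding fresh-keyed inserts appends the pairs to the items
theorem pv_items_foldl_insert {α : Type} (key : α → String) (val : α → Int)
    (ps : List α) (d : PySem.Dict String Int)
    (hfree : ∀ p ∈ ps, d.contains (key p) = false) (hnd : (ps.map key).Nodup) :
    (ps.foldl (fun c p => c.insert (key p) (val p)) d).items
      = d.items ++ ps.map (fun p => (key p, val p)) := by
  induction ps generalizing d with
  | nil => simp
  | cons p ps ih =>
    simp only [List.map_cons, List.nodup_cons, List.mem_map] at hnd
    have hfp : d.contains (key p) = false := hfree p (by simp)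
    rw [List.foldl_cons, ih]
    · rw [PySem.Dict.items_insert_of_not_contains d (val p) hfp, List.append_assoc]
      rfl
    · intro q hq
      rw [PySem.Dict.contains_insert]
      have h1 : (key q == key p) = false := by
        simp only [beq_eq_false_iff_ne, ne_eq]
        intro h; exact hnd.1 ⟨q, hq, h⟩
      simp [h1, hfree q (List.mem_cons_of_mem _ hq)]
    · exact hnd.2

-- the stripped non-empty targets, and the common normal form of both ports' results
def pvTargets (rows : List (List (String × String))) : List String :=
  (rows.map (fun row => PySem.Str.strip ((PySem.Dict.mk row).getD "TargetPath" ""))).filter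
    (fun t => !(t == ""))

def pvPairs (ts : List String) : List (String × Int) :=
  ((PySem.Set.ofList ts).filter (fun k => decide (1 < (ts.count k : Int)))).map
    (fun k => (k, (ts.count k : Int) - 1))

theorem pv_A_norm (rows : List (List (String × String))) :
    detect_collisions_in_mapping rows = pvPairs (pvTargets rows) := by
  unfold detect_collisions_in_mapping pvPairs pvTargets
  have hskip := pv_skip_loop
    (fun row => PySem.Str.strip ((PySem.Dict.mk row).getD "TargetPath" ""))
    rows PySem.Dict.empty
  dsimp only at hskip ⊢
  rw [hskip, PySem.Dict.foldl_insert_getD_add_one_eq_counter]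
  set ts : List String :=
    (rows.map (fun row => PySem.Str.strip ((PySem.Dict.mk row).getD "TargetPath" ""))).filter
      (fun t => !(t == "")) with hts
  rw [PySem.Dict.items_counter,
    pv_foldl_if_filter (fun p : String × Int => 1 < p.2)
      (fun (c : PySem.Dict String Int) p => c.insert p.1 (p.2 - 1)),
    List.filter_map]
  simp only [Function.comp_def]
  have hnd : (((PySem.Set.ofList ts).filter (fun k => decide (1 < (ts.count k : Int)))).map
      (fun k : String => (k, (ts.count k : Int)))).map Prod.fst |>.Nodup := by
    rw [List.map_map]
    have h1 : Prod.fst ∘ (fun k : String => (k, (ts.count k : Int))) = id := rfl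
    rw [h1, List.map_id]
    exact (PySem.Set.nodup_ofList _).filter _
  have hins := pv_items_foldl_insert Prod.fst (fun p : String × Int => p.2 - 1)
    (((PySem.Set.ofList ts).filter (fun k => decide (1 < (ts.count k : Int)))).map
      (fun k : String => (k, (ts.count k : Int))))
    PySem.Dict.empty
    (by intro p _; exact PySem.Dict.contains_empty p.1) hnd
  dsimp only at hins
  rw [hins]
  simp [List.map_map, Function.comp_def]
  rfl

-- adding elements already in (or a cons prefix over) the accumulator
theorem pv_foldl_add_mem (l : List String) (acc : PySem.Set String) (t : String)
    (ht : t ∈ acc) :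
    List.foldl PySem.Set.add acc l
      = List.foldl PySem.Set.add acc (l.filter (fun x => !(x == t))) := by
  induction l generalizing acc with
  | nil => rfl
  | cons a l ih =>
    by_cases h : a = t
    · subst h
      have : PySem.Set.add acc a = acc := by simp [PySem.Set.add, ht]
      simp [this, ih acc ht]
    · simp only [List.filter_cons, beq_iff_eq, h, not_false_iff, Bool.not_eq_true']
      have hb : (a == t) = false := by simp [h]
      rw [hb]
      simp only [List.foldl_cons]
      exact ih _ (by simp [PySem.Set.add]; split_ifs <;> simp [ht])

theorem pv_foldl_add_cons (l : List String) (s : List String) (t : String)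
    (hl : ∀ x ∈ l, x ≠ t) :
    List.foldl PySem.Set.add (t :: s) l = t :: List.foldl PySem.Set.add s l := by
  induction l generalizing s with
  | nil => rfl
  | cons a l ih =>
    have ha : a ≠ t := hl a (by simp)
    have : PySem.Set.add (t :: s) a = t :: PySem.Set.add s a := by
      simp [PySem.Set.add, ha]
      split_ifs <;> simp
    rw [List.foldl_cons, this, List.foldl_cons]
    exact ih _ (fun x hx => hl x (by simp [hx]))

-- first-occurrence dedup of a cons = head :: dedup of the tail with the head removed
theorem pv_ofList_cons (t : String) (rest : List String) :
    PySem.Set.ofList (t :: rest)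
      = t :: PySem.Set.ofList (rest.filter (fun x => !(x == t))) := by
  unfold PySem.Set.ofList
  rw [List.foldl_cons]
  show List.foldl PySem.Set.add [t] rest
      = t :: List.foldl PySem.Set.add [] (rest.filter (fun x => !(x == t)))
  rw [pv_foldl_add_mem rest [t] t (by simp)]
  exact pv_foldl_add_cons _ [] t (by intro x hx; simpa using (List.mem_filter.1 hx).2)

theorem pv_count_filter_ne (x t : String) (l : List String) (hx : x ≠ t) :
    (l.filter (fun y => !(y == t))).count x = l.count x := by
  induction l with
  | nil => rfl
  | cons a l ih =>
    by_cases h : a = t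
    · subst h
      simp [List.count_cons, ih, Ne.symm hx]
    · have hb : (a == t) = false := by simp [h]
      simp [List.filter_cons, hb, List.count_cons, ih]

theorem pv_filter_length_count (t : String) (l : List String) :
    (l.length : Int) - ((l.filter (fun x => !(x == t))).length : Int) = (l.count t : Int) := by
  induction l with
  | nil => rfl
  | cons a l ih =>
    by_cases h : a = t
    · subst h; simp [List.filter_cons, List.count_cons]; omega
    · have hb : (a == t) = false := by simp [h]
      have hc : (t == a) = false := by simp [Ne.symm h]
      simp [List.filter_cons, hb, List.count_cons, hc]
      omega

theorem pv_B_norm_aux (fuel : Nat) : ∀ (ts : List String), ts.length ≤ fuel → pvCollide ts = pvPairs ts := by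
  induction fuel with
  | zero =>
    intro ts h
    have h0 : ts = [] := by cases ts <;> simp_all
    subst h0; rw [pvCollide.eq_def]; rfl
  | succ m ih =>
    intro ts h
    cases ts with
    | nil => rw [pvCollide.eq_def]; rfl
    | cons t rest =>
      have hr : rest.length ≤ m := by simpa using h
      rw [pvCollide.eq_def]
      dsimp only
      set others := rest.filter (fun x => !(x == t)) with hothers
      set n : Int := 1 + (rest.length : Int) - (others.length : Int) with hndef
      have iho := ih others ((List.length_filter_le _ _).trans hr)
      have hn : n = ((t :: rest).count t : Int) := by
        have hf := pv_filter_length_count t rest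
        rw [← hothers] at hf
        simp only [List.count_cons_self, hndef]
        omega
      have hcnt : ∀ x ∈ PySem.Set.ofList others,
          (others.count x : Int) = ((t :: rest).count x : Int) := by
        intro x hxm
        have hx : x ∈ others := (PySem.Set.mem_ofList others x).1 hxm
        have hxt : x ≠ t := by
          have h2 := (List.mem_filter.1 hx).2
          simpa using h2
        rw [pv_count_filter_ne x t rest hxt]
        simp [List.count_cons, Ne.symm hxt]
      conv_rhs => rw [pvPairs, pv_ofList_cons, ← hothers]
      rw [List.filter_cons]
      have hfc : ∀ x ∈ PySem.Set.ofList others,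
          (decide (1 < ((t :: rest).count x : Int))) = (decide (1 < (others.count x : Int))) := by
        intro x hx; rw [← hcnt x hx]
      rw [List.filter_congr hfc]
      have hmc : ∀ x ∈ (PySem.Set.ofList others).filter (fun k => decide (1 < (others.count k : Int))),
          (fun k => (k, ((t :: rest).count k : Int) - 1)) x
            = (fun k => (k, (others.count k : Int) - 1)) x := by
        intro x hx
        have := hcnt x (List.mem_of_mem_filter hx)
        simp [← this]
      by_cases h1 : 1 < n
      · have hd : decide (1 < ((t :: rest).count t : Int)) = true := by
          rw [← hn]; exact decide_eq_true h1
        rw [if_pos h1, hd]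
        simp only [ite_true]
        rw [List.map_cons, List.map_congr_left hmc, ← pvPairs, ← iho, hn]
      · have hd : decide (1 < ((t :: rest).count t : Int)) = false := by
          rw [← hn]; exact decide_eq_false h1
        rw [if_neg h1, hd]
        simp only [Bool.false_eq_true, ite_false]
        rw [List.map_congr_left hmc, ← pvPairs, ← iho]

theorem pv_B_norm (ts : List String) : pvCollide ts = pvPairs ts :=
  pv_B_norm_aux ts.length ts (le_refl _)

-- ===== VERDICT (by name: the statement is the Claim_ definition above) =====
theorem detect_collisions_in_mapping_spec : Claim_equal_detect_collisions_in_mapping := by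
  intro rows _ hpre
  unfold Spec_detect_collisions_in_mapping detect_collisions_in_mapping_alt
  rw [pv_A_norm, pv_B_norm]
  rfl
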